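-- pv_equiv track=rewrite | github.com/Met2348/abr | scripts/phase_f_best_of_n_eval.py | _split_steps
-- ===== SOURCE A (Python) =====
-- def _split_steps(solution_text: str) -> list[str]:
--     """Split solution into step prefixes (cumulative, \n\n delimited)."""
--     parts = [p.strip() for p in solution_text.split("\n\n") if p.strip()]
--     if not parts:
--         return [solution_text.strip()]
--     prefixes: list[str] = []
--     cumulative = ""
--     for part in parts:
--         cumulative = (cumulative + "\n\n" + part).lstrip("\n")
--         prefixes.append(cumulative)
--     return prefixes
-- ===== SOURCE B (Python) =====
-- def _split_steps(solution_text: str) -> list[str]: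
--     parts = [p.strip() for p in solution_text.split("\n\n") if p.strip()]
--     if not parts:
--         return [solution_text.strip()]
--     return ["\n\n".join(parts[:i + 1]) for i in range(len(parts))]
-- ===== Notes on version B (the rewrite author's own statement) =====
-- stated objective: simpler
-- what changed: Replaces the running cumulative-string accumulator (and its leading-newline strip patch-up) by computing each step prefix independently as a delimiter-join of the first i+1 parts.
import Mathlib
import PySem

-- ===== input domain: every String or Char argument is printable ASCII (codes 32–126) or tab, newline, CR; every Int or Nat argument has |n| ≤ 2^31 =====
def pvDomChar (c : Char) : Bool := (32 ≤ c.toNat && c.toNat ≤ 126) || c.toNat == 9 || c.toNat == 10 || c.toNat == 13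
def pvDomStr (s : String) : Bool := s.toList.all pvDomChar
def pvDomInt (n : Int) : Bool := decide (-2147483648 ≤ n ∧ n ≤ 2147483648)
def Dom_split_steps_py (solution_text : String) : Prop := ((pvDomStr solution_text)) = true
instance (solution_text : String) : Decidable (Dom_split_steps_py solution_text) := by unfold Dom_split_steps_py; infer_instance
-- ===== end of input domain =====

-- B replaces A's running `cumulative` accumulator (with its `.lstrip("\n")` patch-up) by
-- computing each prefix independently as "\n\n".join(parts[:i+1]); objective: simpler.

-- ===== PORT A =====
-- the shared preprocessing line of both Pythons:
-- parts = [p.strip() for p in solution_text.split("\n\n") if p.strip()]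
def pvParts (solution_text : String) : List (List Char) :=
  ((PySem.Chars.splitOn solution_text.toList "\n\n".toList).map
      (fun p => PySem.Chars.strip p)).filter (fun p => p ≠ [])

def split_steps_py (solution_text : String) : List String :=
  let parts := pvParts solution_text
  if parts = [] then [String.ofList (PySem.Chars.strip solution_text.toList)]
  else
    -- for part in parts: cumulative = (cumulative + "\n\n" + part).lstrip("\n"); prefixes.append(cumulative)
    -- `.lstrip("\n")` ported by hand as dropWhile (· == '\n'): exact, the strip set is the single char '\n'
    (parts.foldl (fun (st : List (List Char) × List Char) part =>
        let cum := (st.2 ++ '\n' :: '\n' :: part).dropWhile (fun c => c == '\n')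
        (st.1 ++ [cum], cum)) ([], [])).1.map String.ofList

-- ===== PORT B =====
def split_steps_py_alt (solution_text : String) : List String :=
  let parts := pvParts solution_text
  if parts = [] then [String.ofList (PySem.Chars.strip solution_text.toList)]
  else
    -- ["\n\n".join(parts[:i+1]) for i in range(len(parts))]
    (List.range parts.length).map (fun i =>
      String.ofList (PySem.Chars.join "\n\n".toList (parts.take (i + 1))))

-- ===== PRECONDITION & SPEC =====
def Spec_split_steps_py (solution_text : String) (out : List String) : Prop := out = split_steps_py_alt solution_text
instance (solution_text : String) (out : List String) : Decidable (Spec_split_steps_py solution_text out) := by unfold Spec_split_steps_py; infer_instance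

-- ===== CLAIM (what is proved, stated in full; the proofs are below) =====
def Claim_equal_split_steps_py : Prop := ∀ (solution_text : String), Dom_split_steps_py solution_text → Spec_split_steps_py solution_text (split_steps_py solution_text)

-- ===== LEMMAS AND PROOFS =====

-- cumulative joins of successive parts, seeded with a first prefix c
def pvPrefJoin (c : List Char) : List (List Char) → List (List Char)
  | [] => []
  | p :: ps => (c ++ '\n' :: '\n' :: p) :: pvPrefJoin (c ++ '\n' :: '\n' :: p) ps

-- every nonempty stripped chunk starts with a non-whitespace character, in particular not '\n'
lemma pvStrip_head_not_nl (q : List Char) (h : PySem.Chars.strip q ≠ []) :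
    (PySem.Chars.strip q).head? ≠ some '\n' := by
  have hpre : PySem.Chars.strip q <+: PySem.Chars.lstrip q := by
    simpa [PySem.Chars.strip, PySem.Chars.rstrip] using
      (List.reverse_prefix.mpr (List.dropWhile_suffix (l := (PySem.Chars.lstrip q).reverse)
        (p := PySem.Chars.isspace)))
  obtain ⟨t, ht⟩ := hpre
  have hh : (PySem.Chars.strip q).head? = (PySem.Chars.lstrip q).head? := by
    rw [← ht, List.head?_append]
    cases hc : (PySem.Chars.strip q).head? with
    | none => exact absurd (List.head?_eq_none_iff.mp hc) h
    | some a => rfl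
  intro hcon
  have := List.head?_dropWhile_not PySem.Chars.isspace q
  rw [show List.dropWhile PySem.Chars.isspace q = PySem.Chars.lstrip q from rfl, ← hh, hcon] at this
  simp [PySem.Chars.isspace] at this

lemma pvParts_facts (s : String) (p : List Char) (hp : p ∈ pvParts s) :
    p ≠ [] ∧ p.head? ≠ some '\n' := by
  unfold pvParts at hp
  rw [List.mem_filter] at hp
  obtain ⟨hmem, hne⟩ := hp
  obtain ⟨q, _, rfl⟩ := List.mem_map.mp hmem
  have hne' : PySem.Chars.strip q ≠ [] := by simpa using hne
  exact ⟨hne', pvStrip_head_not_nl q hne'⟩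

-- a cumulative value that starts with a non-'\n' character passes the lstrip("\n") untouched
lemma pvDrop_of_head (c p : List Char) (hc : c ≠ []) (hch : c.head? ≠ some '\n') :
    (c ++ '\n' :: '\n' :: p).dropWhile (fun c => c == '\n') = c ++ '\n' :: '\n' :: p := by
  cases c with
  | nil => exact absurd rfl hc
  | cons a t =>
    have ha : a ≠ '\n' := by intro h; exact hch (by simp [h])
    simp [ha]

-- the A-side fold, once the accumulator is a nonempty non-'\n'-headed string, appends pvPrefJoin
lemma pvFold_inv (L : List (List Char)) (acc : List (List Char)) (c : List Char)
    (hc : c ≠ []) (hch : c.head? ≠ some '\n') :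
    (L.foldl (fun (st : List (List Char) × List Char) part =>
        (st.1 ++ [(st.2 ++ '\n' :: '\n' :: part).dropWhile (fun c => c == '\n')],
          (st.2 ++ '\n' :: '\n' :: part).dropWhile (fun c => c == '\n'))) (acc, c)).1
      = acc ++ pvPrefJoin c L := by
  induction L generalizing acc c with
  | nil => simp [pvPrefJoin]
  | cons p ps ih =>
    simp only [List.foldl_cons, pvPrefJoin, pvDrop_of_head c p hc hch]
    rw [ih (acc ++ [c ++ '\n' :: '\n' :: p]) (c ++ '\n' :: '\n' :: p)
        (by simp [hc]) (by cases c with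
            | nil => exact absurd rfl hc
            | cons a t => simpa using hch)]
    simp

lemma pvPrefJoin_map (d : List Char) (ps : List (List Char)) (c : List Char) :
    (pvPrefJoin c ps).map (fun x => d ++ x) = pvPrefJoin (d ++ c) ps := by
  induction ps generalizing c with
  | nil => simp [pvPrefJoin]
  | cons p t ih => simp [pvPrefJoin, ← ih (c ++ '\n' :: '\n' :: p), List.append_assoc]

-- the B-side prefix joins are exactly head-cons-pvPrefJoin
lemma pvJoin_take (p : List Char) (ps : List (List Char)) :
    (List.range (ps.length + 1)).map
        (fun i => PySem.Chars.join "\n\n".toList ((p :: ps).take (i + 1)))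
      = p :: pvPrefJoin p ps := by
  induction ps generalizing p with
  | nil => simp [pvPrefJoin, PySem.Chars.join_singleton]
  | cons q qs ih =>
    simp only [List.length_cons]
    rw [List.range_succ_eq_map, List.map_cons]
    simp only [List.map_map]
    have hterm : ∀ i : ℕ,
        PySem.Chars.join "\n\n".toList ((p :: q :: qs).take (i + 1 + 1))
          = p ++ '\n' :: '\n' :: PySem.Chars.join "\n\n".toList ((q :: qs).take (i + 1)) := by
      intro i
      have : (p :: q :: qs).take (i + 1 + 1) = p :: q :: qs.take i := by simp
      rw [this, show (q :: qs).take (i + 1) = q :: qs.take i by simp,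
        PySem.Chars.join_cons_cons]
      simp
    have hmap : (List.range (qs.length + 1)).map
          ((fun i => PySem.Chars.join "\n\n".toList ((p :: q :: qs).take (i + 1))) ∘ Nat.succ)
        = ((List.range (qs.length + 1)).map
            (fun i => PySem.Chars.join "\n\n".toList ((q :: qs).take (i + 1)))).map
          (fun x => p ++ '\n' :: '\n' :: x) := by
      rw [List.map_map]
      exact List.map_congr_left (fun i _ => hterm i)
    rw [hmap, ih q]
    simp only [List.map_cons, pvPrefJoin]
    have hpm := pvPrefJoin_map (p ++ ['\n', '\n']) qs q
    simp only [List.append_assoc, List.cons_append, List.nil_append] at hpm ⊢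
    rw [hpm]
    simp [PySem.Chars.join_singleton]

-- ===== VERDICT (by name: the statement is the Claim_ definition above) =====
theorem split_steps_py_spec : Claim_equal_split_steps_py := by
  intro s _
  unfold Spec_split_steps_py split_steps_py split_steps_py_alt
  by_cases h : pvParts s = []
  · simp [h]
  · simp only [h]
    cases hP : pvParts s with
    | nil => exact absurd hP h
    | cons p ps =>
      have hfacts := pvParts_facts s
      have hp : p ≠ [] ∧ p.head? ≠ some '\n' := hfacts p (by rw [hP]; simp)
      congr 1
      -- first loop iteration: lstrip("\n") of "\n\n" + p is p
      have hfirst : ('\n' :: '\n' :: p).dropWhile (fun c => c == '\n') = p := by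
        cases p with
        | nil => exact absurd rfl hp.1
        | cons a t =>
          have ha : a ≠ '\n' := by intro h'; exact hp.2 (by simp [h'])
          simp [ha]
      rw [List.foldl_cons]
      simp only [hfirst, List.nil_append]
      rw [pvFold_inv ps [p] p hp.1 hp.2]
      simp only [List.singleton_append, List.length_cons, ← pvJoin_take p ps, List.map_map]
      rfl
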